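-- pv_equiv track=rewrite | github.com/SilentGamzee/AutoCooker | core/linter.py | _remove_css_comments
-- ===== SOURCE A (Python) =====
-- def _remove_css_comments(css: str) -> str:
--     result = []
--     i = 0
--     while i < len(css):
--         if css[i:i+2] == "/*":
--             end = css.find("*/", i + 2)
--             i = end + 2 if end != -1 else len(css)
--         else:
--             result.append(css[i])
--             i += 1
--     return "".join(result)
-- ===== SOURCE B (Python) =====
-- def _remove_css_comments(css: str) -> str:
--     out = []
--     pos = 0
--     while True:
--         j = css.find("/*", pos)
--         if j == -1:
--             out.append(css[pos:])
--             break
--         out.append(css[pos:j])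
--         k = css.find("*/", j + 2)
--         if k == -1:
--             break
--         pos = k + 2
--     return "".join(out)
-- ===== Notes on version B (the rewrite author's own statement) =====
-- stated objective: faster
-- what changed: Replaced the per-character scan that appends one char at a time with a loop that jumps between find('/*') / find('*/') results and copies whole uncommented slices.
import Mathlib
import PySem

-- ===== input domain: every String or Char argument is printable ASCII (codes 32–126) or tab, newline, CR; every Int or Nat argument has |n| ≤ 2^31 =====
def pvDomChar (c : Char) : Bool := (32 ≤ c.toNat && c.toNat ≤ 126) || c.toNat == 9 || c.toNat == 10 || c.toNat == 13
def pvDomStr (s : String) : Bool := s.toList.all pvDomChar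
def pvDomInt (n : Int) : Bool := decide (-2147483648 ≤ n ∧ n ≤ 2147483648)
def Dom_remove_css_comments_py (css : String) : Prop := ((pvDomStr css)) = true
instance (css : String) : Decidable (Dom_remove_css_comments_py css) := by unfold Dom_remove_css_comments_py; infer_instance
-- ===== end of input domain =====

-- B replaces A's per-character scan with a loop that jumps between find("/*")/find("*/") results and copies whole slices.

-- ===== PORT A =====
-- A's while loop: i advances by 1 outside comments (appending css[i]); at "/*" it jumps past the next "*/".
-- i strictly increases every iteration, so fuel = css.length makes the port exact.
def removeLoopA (css : List Char) (fuel : Nat) (i : Nat) (result : List Char) : List Char :=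
  match fuel with
  | 0 => result
  | fuel + 1 =>
    if h : i < css.length then
      if PySem.List.slice css (some (i : Int)) (some ((i : Int) + 2)) = ['/', '*'] then
        let e := PySem.Chars.findFrom css ['*', '/'] ((i : Int) + 2) none
        removeLoopA css fuel (if e ≠ -1 then (e + 2).toNat else css.length) result
      else
        removeLoopA css fuel (i + 1) (result ++ [css[i]])
    else result


def remove_css_comments_py (css : String) : String :=
  String.ofList (removeLoopA css.toList css.toList.length 0 [])

-- ===== PORT B =====
-- B's while-True loop: j = css.find("/*", pos); out.append(css[pos:j]); k = css.find("*/", j+2); pos = k+2.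
-- pos strictly increases every iteration, so fuel = css.length + 1 makes the port exact.
def removeLoopB (css : List Char) (fuel : Nat) (pos : Nat) (out : List (List Char)) : List (List Char) :=
  match fuel with
  | 0 => out
  | fuel + 1 =>
    let j := PySem.Chars.findFrom css ['/', '*'] (pos : Int) none
    if j = -1 then
      out ++ [PySem.List.slice css (some (pos : Int)) none]
    else
      let out' := out ++ [PySem.List.slice css (some (pos : Int)) (some j)]
      let k := PySem.Chars.findFrom css ['*', '/'] (j + 2) none
      if k = -1 then out'
      else removeLoopB css fuel (k + 2).toNat out'


def remove_css_comments_py_alt (css : String) : String :=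
  String.ofList (removeLoopB css.toList (css.toList.length + 1) 0 []).flatten

-- ===== PRECONDITION & SPEC =====
def Spec_remove_css_comments_py (css : String) (out : String) : Prop := out = remove_css_comments_py_alt css
instance (css : String) (out : String) : Decidable (Spec_remove_css_comments_py css out) := by unfold Spec_remove_css_comments_py; infer_instance

-- ===== CLAIM (what is proved, stated in full; the proofs are below) =====
def Claim_equal_remove_css_comments_py : Prop := ∀ (css : String), Dom_remove_css_comments_py css → Spec_remove_css_comments_py css (remove_css_comments_py css)

-- ===== LEMMAS AND PROOFS =====

-- common specification: the comment-stripped text of css from position i onward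
def specGo (css : List Char) (i : Nat) : List Char :=
  if h : i < css.length then
    if ['/', '*'] <+: css.drop i then
      let f := PySem.Chars.find (css.drop (i + 2)) ['*', '/']
      if f = -1 then [] else specGo css (i + 2 + f.toNat + 2)
    else css[i] :: specGo css (i + 1)
  else []
termination_by css.length - i
decreasing_by all_goals omega


theorem find_eq_of {cs sub : List Char} {n : Nat} (h1 : sub <+: cs.drop n)
    (h2 : ∀ i, i < n → ¬ sub <+: cs.drop i) : PySem.Chars.find cs sub = n := by
  have hnn : 0 ≤ PySem.Chars.find cs sub := by
    rw [PySem.Chars.find_nonneg_iff, ← PySem.Chars.isIn_iff_infix,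
        ← PySem.Chars.exists_prefix_drop_iff_isIn]
    exact ⟨n, h1⟩
  obtain ⟨hp, hmin⟩ := PySem.Chars.find_spec hnn
  rcases lt_trichotomy (PySem.Chars.find cs sub).toNat n with h | h | h
  · exact absurd hp (h2 _ h)
  · omega
  · exact absurd h1 (hmin n h)


theorem find_cons_not_prefix {c : Char} {cs sub : List Char} (h : ¬ sub <+: (c :: cs)) :
    PySem.Chars.find (c :: cs) sub =
      if PySem.Chars.find cs sub = -1 then -1 else PySem.Chars.find cs sub + 1 := by
  by_cases hf : PySem.Chars.find cs sub = -1
  · simp only [hf, if_pos]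
    rw [PySem.Chars.find_eq_neg_one_iff] at hf ⊢
    intro hinf
    rcases (PySem.Chars.exists_prefix_drop_iff_isIn sub (c :: cs)).2
        ((PySem.Chars.isIn_iff_infix _ _).2 hinf) with ⟨j, hj⟩
    match j with
    | 0 => exact h hj
    | j + 1 =>
      exact hf ((PySem.Chars.isIn_iff_infix _ _).1
        ((PySem.Chars.exists_prefix_drop_iff_isIn _ _).1 ⟨j, by simpa using hj⟩))
  · have hnn : 0 ≤ PySem.Chars.find cs sub := by
      have := PySem.Chars.neg_one_le_find cs sub; omega
    obtain ⟨hp, hmin⟩ := PySem.Chars.find_spec hnn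
    have : PySem.Chars.find (c :: cs) sub = ((PySem.Chars.find cs sub).toNat + 1 : Nat) := by
      apply find_eq_of
      · simpa using hp
      · intro i hi
        match i with
        | 0 => exact h
        | i + 1 => exact fun hpre => hmin i (by omega) (by simpa using hpre)
    rw [this, if_neg hf]
    omega


theorem drop_cons_self (css : List Char) (i : Nat) (h : i < css.length) :
    css.drop i = css[i] :: css.drop (i + 1) := List.drop_eq_getElem_cons h


theorem specGo_no_opener (css : List Char) (pos : Nat) (hle : pos ≤ css.length)
    (h : PySem.Chars.find (css.drop pos) ['/', '*'] = -1) :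
    specGo css pos = css.drop pos := by
  rw [specGo]
  by_cases hlt : pos < css.length
  · rw [dif_pos hlt]
    have hnp : ¬ ['/', '*'] <+: css.drop pos := by
      intro hp
      exact (PySem.Chars.find_eq_neg_one_iff _ _).1 h hp.isInfix
    rw [if_neg hnp]
    have hrec : PySem.Chars.find (css.drop (pos + 1)) ['/', '*'] = -1 := by
      rw [PySem.Chars.find_eq_neg_one_iff] at h ⊢
      intro hinf
      refine h ?_
      rw [drop_cons_self css pos hlt]
      exact List.infix_cons hinf
    rw [specGo_no_opener css (pos + 1) (by omega) hrec, drop_cons_self css pos hlt]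
  · rw [dif_neg hlt, eq_comm, List.drop_eq_nil_iff]
    omega
termination_by css.length - pos
decreasing_by omega


theorem specGo_skip (css : List Char) (pos n : Nat) (hle : pos ≤ css.length)
    (hfind : PySem.Chars.find (css.drop pos) ['/', '*'] = (n : Int)) :
    specGo css pos = (css.drop pos).take n ++ specGo css (pos + n) := by
  induction n generalizing pos with
  | zero => simp
  | succ n ih =>
    have hnn : (0:Int) ≤ PySem.Chars.find (css.drop pos) ['/', '*'] := by rw [hfind]; positivity
    obtain ⟨hp, hmin⟩ := PySem.Chars.find_spec hnn
    have hlen : ((n + 1 : Nat) : Int) ≤ ((css.drop pos).length : Int) := by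
      rw [← hfind]; exact PySem.Chars.find_le_length _ _
    have hlt : pos < css.length := by simp at hlen; omega
    have hnp : ¬ ['/', '*'] <+: css.drop pos := by
      have := hmin 0 (by omega); simpa using this
    rw [specGo, dif_pos hlt, if_neg hnp]
    have hcons := find_cons_not_prefix (c := css[pos]) (cs := css.drop (pos + 1))
      (sub := ['/', '*']) (by rw [← drop_cons_self css pos hlt]; exact hnp)
    rw [← drop_cons_self css pos hlt, hfind] at hcons
    have hrec : PySem.Chars.find (css.drop (pos + 1)) ['/', '*'] = (n : Int) := by
      by_cases hneg : PySem.Chars.find (css.drop (pos + 1)) ['/', '*'] = -1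
      · rw [hneg, if_pos rfl] at hcons; omega
      · rw [if_neg hneg] at hcons; omega
    rw [ih (pos + 1) (by omega) hrec, drop_cons_self css pos hlt, List.take_succ_cons]
    have : pos + (n + 1) = pos + 1 + n := by omega
    rw [this]
    simp


theorem loopA_eq_spec (css : List Char) (fuel : Nat) : ∀ (i : Nat) (acc : List Char),
    i ≤ css.length → css.length ≤ fuel + i →
    removeLoopA css fuel i acc = acc ++ specGo css i := by
  induction fuel with
  | zero =>
    intro i acc hle hf
    have : i = css.length := by omega
    subst this
    rw [removeLoopA, specGo, dif_neg (by omega)]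
    simp
  | succ fuel ih =>
    intro i acc hle hf
    rw [removeLoopA]
    by_cases h : i < css.length
    · rw [dif_pos h]
      have hcast : ((i : Int) + 2) = (((i + 2 : Nat)) : Int) := by push_cast; ring
      by_cases hop : PySem.List.slice css (some (i : Int)) (some ((i : Int) + 2)) = ['/', '*']
      · rw [if_pos hop]
        rw [hcast, PySem.List.slice_natCast] at hop
        have htake : (css.drop i).take 2 = ['/', '*'] := by
          have : i + 2 - i = 2 := by omega
          rwa [this] at hop
        have hpre : ['/', '*'] <+: css.drop i := by
          rw [List.prefix_iff_eq_take]; exact htake.symm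
        have hi2 : i + 2 ≤ css.length := by
          have := hpre.length_le; simp at this; omega
        rw [specGo, dif_pos h, if_pos hpre]
        simp only [hcast, PySem.Chars.findFrom_natCast css ['*', '/'] (i + 2) hi2]
        by_cases hfneg : PySem.Chars.find (css.drop (i + 2)) ['*', '/'] = -1
        · rw [if_pos hfneg, hfneg]
          norm_num
          rw [ih css.length acc (by omega) (by omega), specGo, dif_neg (by omega)]
          simp
        · have hnn : 0 ≤ PySem.Chars.find (css.drop (i + 2)) ['*', '/'] := by
            have := PySem.Chars.neg_one_le_find (css.drop (i + 2)) ['*', '/']; omega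
          rw [if_neg hfneg]
          obtain ⟨hp, -⟩ := PySem.Chars.find_spec hnn
          set n := (PySem.Chars.find (css.drop (i + 2)) ['*', '/']).toNat with hn
          have hbound : i + 2 + n + 2 ≤ css.length := by
            have h2 := hp.length_le
            rw [List.drop_drop] at h2
            simp at h2
            omega
          have hidx : (if ((i + 2 : Nat) : Int) + PySem.Chars.find (css.drop (i + 2)) ['*', '/'] ≠ -1
              then (((i + 2 : Nat) : Int) + PySem.Chars.find (css.drop (i + 2)) ['*', '/'] + 2).toNat
              else css.length) = i + 2 + n + 2 := by
            rw [if_pos (by push_cast; omega)]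
            push_cast
            omega
          rw [hidx, ih (i + 2 + n + 2) acc (by omega) (by omega), if_neg hfneg]
      · rw [if_neg hop, specGo, dif_pos h]
        have hnp : ¬ ['/', '*'] <+: css.drop i := by
          intro hpre
          apply hop
          rw [hcast, PySem.List.slice_natCast]
          have : i + 2 - i = 2 := by omega
          rw [this]
          rw [List.prefix_iff_eq_take] at hpre
          exact hpre.symm
        rw [if_neg hnp, ih (i + 1) (acc ++ [css[i]]) (by omega) (by omega)]
        simp
    · rw [dif_neg h, specGo, dif_neg h]
      simp


theorem loopB_eq_spec (css : List Char) (fuel : Nat) : ∀ (pos : Nat) (out : List (List Char)),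
    pos ≤ css.length → css.length < fuel + pos →
    (removeLoopB css fuel pos out).flatten = out.flatten ++ specGo css pos := by
  induction fuel with
  | zero => intro pos out hle hf; omega
  | succ fuel ih =>
    intro pos out hle hf
    rw [removeLoopB]
    simp only [PySem.Chars.findFrom_natCast css ['/', '*'] pos hle]
    by_cases hf0 : PySem.Chars.find (css.drop pos) ['/', '*'] = -1
    · rw [if_pos (by rw [hf0]; norm_num)]
      rw [specGo_no_opener css pos hle hf0, PySem.List.slice_from_natCast]
      simp
    · have hnn : 0 ≤ PySem.Chars.find (css.drop pos) ['/', '*'] := by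
        have := PySem.Chars.neg_one_le_find (css.drop pos) ['/', '*']; omega
      set f0 := (PySem.Chars.find (css.drop pos) ['/', '*']).toNat with hf0n
      have hfind : PySem.Chars.find (css.drop pos) ['/', '*'] = (f0 : Int) := by omega
      obtain ⟨hp, -⟩ := PySem.Chars.find_spec hnn
      rw [← hf0n, List.drop_drop] at hp
      have hj2 : pos + f0 + 2 ≤ css.length := by
        have := hp.length_le; simp at this; omega
      rw [if_neg (by omega)]
      simp only [if_neg hf0]
      have hslice : PySem.List.slice css (some (pos : Int))
          (some ((pos : Int) + PySem.Chars.find (css.drop pos) ['/', '*'])) =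
          (css.drop pos).take f0 := by
        rw [hfind, show (pos : Int) + (f0 : Int) = ((pos + f0 : Nat) : Int) by push_cast; ring,
            PySem.List.slice_natCast]
        congr 1
        omega
      have hcast2 : (pos : Int) + PySem.Chars.find (css.drop pos) ['/', '*'] + 2 =
          ((pos + f0 + 2 : Nat) : Int) := by rw [hfind]; push_cast; ring
      rw [hslice, hcast2, PySem.Chars.findFrom_natCast css ['*', '/'] (pos + f0 + 2) hj2]
      have hopen : ['/', '*'] <+: css.drop (pos + f0) := hp
      have hspec : specGo css pos = (css.drop pos).take f0 ++ specGo css (pos + f0) :=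
        specGo_skip css pos f0 hle hfind
      have hspecj : specGo css (pos + f0) =
          (if PySem.Chars.find (css.drop (pos + f0 + 2)) ['*', '/'] = -1 then []
           else specGo css (pos + f0 + 2 +
             (PySem.Chars.find (css.drop (pos + f0 + 2)) ['*', '/']).toNat + 2)) := by
        rw [specGo, dif_pos (by omega), if_pos hopen]
      by_cases hk : PySem.Chars.find (css.drop (pos + f0 + 2)) ['*', '/'] = -1
      · rw [if_pos (by rw [hk]; norm_num)]
        rw [hspec, hspecj, if_pos hk]
        simp
      · have hknn : 0 ≤ PySem.Chars.find (css.drop (pos + f0 + 2)) ['*', '/'] := by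
          have := PySem.Chars.neg_one_le_find (css.drop (pos + f0 + 2)) ['*', '/']; omega
        set g := (PySem.Chars.find (css.drop (pos + f0 + 2)) ['*', '/']).toNat with hgn
        obtain ⟨hpk, -⟩ := PySem.Chars.find_spec hknn
        rw [← hgn, List.drop_drop] at hpk
        have hk2 : pos + f0 + 2 + g + 2 ≤ css.length := by
          have := hpk.length_le; simp at this; omega
        rw [if_neg (by omega)]
        simp only [if_neg hk]
        have hidx : (((pos + f0 + 2 : Nat) : Int) +
            PySem.Chars.find (css.drop (pos + f0 + 2)) ['*', '/'] + 2).toNat =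
            pos + f0 + 2 + g + 2 := by push_cast; omega
        rw [hidx, ih (pos + f0 + 2 + g + 2) _ (by omega) (by omega)]
        rw [hspec, hspecj, if_neg hk]
        simp

-- ===== VERDICT (by name: the statement is the Claim_ definition above) =====
theorem remove_css_comments_py_spec : Claim_equal_remove_css_comments_py := by
  intro css _
  unfold Spec_remove_css_comments_py remove_css_comments_py remove_css_comments_py_alt
  rw [loopA_eq_spec css.toList css.toList.length 0 [] (by omega) (by omega),
      loopB_eq_spec css.toList (css.toList.length + 1) 0 [] (by omega) (by omega)]
  simp
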